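-- pv_equiv track=rewrite | github.com/AliHisham149/Misalignment-in-FinetunedLLMs | resultsAnalysis/scripts/analyze_trust_score_patterns.py | categorize_cwe
-- ===== SOURCE A (Python) =====
-- def categorize_cwe(cwe):
--     """Categorize CWE into high-level categories."""
--     if not cwe:
--         return "Unknown"
--
--     cwe_num = cwe.split('-')[-1] if '-' in cwe else cwe
--
--     # Security categories based on CWE taxonomy
--     categories = {
--         'injection': ['78', '89', '90', '91', '93', '94', '95', '96', '97', '98', '99'],
--         'crypto': ['327', '326', '310', '311', '312', '313', '314', '315', '316', '317', '318', '319', '320', '321', '322', '323', '324', '325'],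
--         'auth': ['287', '285', '286', '288', '289', '290', '291', '292', '293', '294', '295', '296', '297', '298', '299', '300', '301', '302', '303', '304', '305', '306', '307', '308', '309'],
--         'input_validation': ['20', '22', '23', '24', '25', '26', '27', '28', '29', '30', '31', '32', '33', '34', '35', '36', '37', '38', '39', '40', '41', '42', '43', '44', '45', '46', '47', '48', '49'],
--         'info_exposure': ['200', '201', '202', '203', '204', '205', '206', '207', '208', '209', '210', '211', '212', '213', '214', '215', '216', '217', '218', '219', '220', '221', '222', '223', '224', '225', '226', '227', '228', '229', '230', '231', '232', '233', '234', '235', '236', '237', '238', '239', '240', '241', '242', '243', '244', '245', '246', '247', '248', '249', '250', '251', '252', '253', '254', '255', '256', '257', '258', '259', '260', '261', '262', '263', '264', '265', '266', '267', '268', '269', '270', '271', '272', '273', '274', '275', '276', '277', '278', '279', '280', '281', '282', '283', '284', '285', '286', '287', '288', '289', '290', '291', '292', '293', '294', '295', '296', '297', '298', '299', '300', '301', '302', '303', '304', '305', '306', '307', '308', '309', '310', '311', '312', '313', '314', '315', '316', '317', '318', '319', '320', '321', '322', '323', '324', '325', '326', '327', '328', '329', '330', '331', '332', '333', '334', '335',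 '336', '337', '338', '339', '340', '341', '342', '343', '344', '345', '346', '347', '348', '349', '350', '351', '352', '353', '354', '355', '356', '357', '358', '359', '360', '361', '362', '363', '364', '365', '366', '367', '368', '369', '370', '371', '372', '373', '374', '375', '376', '377', '378', '379', '380', '381', '382', '383', '384', '385', '386', '387', '388', '389', '390', '391', '392', '393', '394', '395', '396', '397', '398', '399'],
--         'resource_management': ['400', '401', '402', '403', '404', '405', '406', '407', '408', '409', '410', '411', '412', '413', '414', '415', '416', '417', '418', '419', '420', '421', '422', '423', '424', '425', '426', '427', '428', '429', '430', '431', '432', '433', '434', '435', '436', '437', '438', '439', '440', '441', '442', '443', '444', '445', '446', '447', '448', '449', '450', '451', '452', '453', '454', '455', '456', '457', '458', '459', '460', '461', '462', '463', '464', '465', '466', '467', '468', '469', '470', '471', '472', '473', '474', '475', '476', '477', '478', '479', '480', '481', '482', '483', '484', '485', '486', '487', '488', '489', '490', '491', '492', '493', '494', '495', '496', '497', '498', '499'],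
--         'other': []
--     }
--
--     for category, cwe_list in categories.items():
--         if cwe_num in cwe_list:
--             return category
--
--     return "other"
-- ===== SOURCE B (Python) =====
-- def categorize_cwe(cwe):
--     """Categorize CWE into high-level categories (length + range tests instead of per-category list scans)."""
--     if not cwe:
--         return "Unknown"
--     num = cwe.split('-')[-1] if '-' in cwe else cwe
--     if len(num) == 2 and num.isdigit():
--         # injection: 78, 89, 90-99 except the deprecated CWE-92
--         if num in ('78', '89') or (num.startswith('9') and num != '92'):
--             return "injection"
--         if '20' <= num <= '49' and num != '21':
--             return "input_validation"
--     elif len(num) == 3 and num.isdigit():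
--         if '310' <= num <= '327':
--             return "crypto"
--         if '285' <= num <= '309':
--             return "auth"
--         if num.startswith(('2', '3')):
--             return "info_exposure"
--         if num.startswith('4'):
--             return "resource_management"
--     return "other"
-- ===== Notes on version B (the rewrite author's own statement) =====
-- stated objective: simpler
-- what changed: Instead of rebuilding a dict of ~460 CWE-number strings on every call and scanning each category's list for membership, B extracts the number string once and classifies it with a few length/digit/prefix and lexicographic range comparisons.
import Mathlib
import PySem

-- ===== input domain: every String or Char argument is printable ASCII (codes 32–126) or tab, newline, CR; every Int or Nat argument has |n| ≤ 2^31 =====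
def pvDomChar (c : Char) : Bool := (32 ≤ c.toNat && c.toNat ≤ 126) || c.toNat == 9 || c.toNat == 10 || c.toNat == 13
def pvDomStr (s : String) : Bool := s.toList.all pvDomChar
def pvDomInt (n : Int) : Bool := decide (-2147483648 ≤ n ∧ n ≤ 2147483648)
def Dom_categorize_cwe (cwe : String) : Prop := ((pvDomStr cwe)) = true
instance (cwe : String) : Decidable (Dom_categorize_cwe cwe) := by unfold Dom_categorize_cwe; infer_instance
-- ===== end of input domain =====

-- B replaces A's per-call dict of ~460 CWE-number strings and its per-category list scans by
-- a handful of length/prefix/lexicographic-range tests on the extracted number string.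

-- ===== PORT A =====
-- the dict literal `categories` (all keys distinct); its .items() in insertion order is this list
def pvCategories : List (String × List String) := [
    ("injection", ["78", "89", "90", "91", "93", "94", "95", "96", "97", "98", "99"]),
    ("crypto", ["327", "326", "310", "311", "312", "313", "314", "315", "316", "317", "318", "319", "320", "321", "322", "323", "324", "325"]),
    ("auth", ["287", "285", "286", "288", "289", "290", "291", "292", "293", "294", "295", "296", "297", "298", "299", "300", "301", "302", "303", "304", "305", "306", "307", "308", "309"]),
    ("input_validation", ["20", "22", "23", "24", "25", "26", "27", "28", "29", "30", "31", "32", "33", "34", "35", "36", "37", "38", "39", "40", "41", "42", "43", "44", "45", "46", "47", "48", "49"]),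
    ("info_exposure", ["200", "201", "202", "203", "204", "205", "206", "207", "208", "209", "210", "211", "212", "213", "214", "215", "216", "217", "218", "219", "220", "221", "222", "223", "224", "225", "226", "227", "228", "229", "230", "231", "232", "233", "234", "235", "236", "237", "238", "239", "240", "241", "242", "243", "244", "245", "246", "247", "248", "249", "250", "251", "252", "253", "254", "255", "256", "257", "258", "259", "260", "261", "262", "263", "264", "265", "266", "267", "268", "269", "270", "271", "272", "273", "274", "275", "276", "277", "278", "279", "280", "281", "282", "283", "284", "285", "286", "287", "288", "289", "290", "291", "292", "293", "294", "295", "296", "297", "298", "299", "300", "301", "302", "303", "304", "305", "306", "307", "308", "309", "310", "311", "312", "313", "314", "315", "316", "317", "318", "319", "320", "321", "322", "323", "324", "325", "326", "327", "328", "329", "330", "331", "332", "333", "334", "335", "336", "337", "338", "339", "340", "341", "342", "343", "344", "345", "346", "347", "348", "349", "350", "351", "352", "353", "354", "355", "356", "357", "358", "359", "360", "361", "362", "363", "364", "365", "366", "367", "368", "369", "370", "371", "372", "373", "374", "375", "376", "377", "378", "379", "380", "381", "382", "383", "384", "385", "386", "387", "388", "389", "390", "391", "392", "393", "394", "395", "396",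 "397", "398", "399"]),
    ("resource_management", ["400", "401", "402", "403", "404", "405", "406", "407", "408", "409", "410", "411", "412", "413", "414", "415", "416", "417", "418", "419", "420", "421", "422", "423", "424", "425", "426", "427", "428", "429", "430", "431", "432", "433", "434", "435", "436", "437", "438", "439", "440", "441", "442", "443", "444", "445", "446", "447", "448", "449", "450", "451", "452", "453", "454", "455", "456", "457", "458", "459", "460", "461", "462", "463", "464", "465", "466", "467", "468", "469", "470", "471", "472", "473", "474", "475", "476", "477", "478", "479", "480", "481", "482", "483", "484", "485", "486", "487", "488", "489", "490", "491", "492", "493", "494", "495", "496", "497", "498", "499"]),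
    ("other", [])]

-- the `for category, cwe_list in categories.items(): if cwe_num in cwe_list: return category` loop,
-- falling through to `return "other"`
def pvScanA : List (String × List String) → String → String
  | [], _ => "other"
  | (category, cwe_list) :: rest, cwe_num =>
      if cwe_list.contains cwe_num then category else pvScanA rest cwe_num

def categorize_cwe (cwe : String) : String :=
  if cwe == "" then "Unknown"
  else
    -- cwe.split('-')[-1]: split? is some (separator "-" is nonempty) and split always returns a
    -- nonempty list, so the [-1] index never fails; both .getD defaults are unreachable
    let cwe_num := if PySem.Str.isIn "-" cwe then
        (PySem.List.pyGet? ((PySem.Str.split? cwe "-").getD []) (-1)).getD ""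
      else cwe
    pvScanA pvCategories cwe_num

-- ===== PORT B =====
-- Python's `s <= t` on str is ported as `!PySem.Chars.strLt t.toList s.toList` (str ≤ = not reversed <)
def categorize_cwe_alt (cwe : String) : String :=
  if cwe == "" then "Unknown"
  else
    let num := if PySem.Str.isIn "-" cwe then
        (PySem.List.pyGet? ((PySem.Str.split? cwe "-").getD []) (-1)).getD ""
      else cwe
    if PySem.Str.len num == 2 && PySem.Str.strIsdigit num then
      -- injection: 78, 89, 90-99 except the deprecated CWE-92
      if num == "78" || num == "89" || (PySem.Str.startswith num "9" && num != "92") then "injection"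
      else if (!PySem.Chars.strLt num.toList "20".toList && !PySem.Chars.strLt "49".toList num.toList)
              && num != "21" then "input_validation"
      else "other"
    else if PySem.Str.len num == 3 && PySem.Str.strIsdigit num then
      if !PySem.Chars.strLt num.toList "310".toList && !PySem.Chars.strLt "327".toList num.toList then "crypto"
      else if !PySem.Chars.strLt num.toList "285".toList && !PySem.Chars.strLt "309".toList num.toList then "auth"
      else if PySem.Str.startswith num "2" || PySem.Str.startswith num "3" then "info_exposure"
      else if PySem.Str.startswith num "4" then "resource_management"
      else "other"
    else "other"

-- ===== PRECONDITION & SPEC =====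
def Spec_categorize_cwe (cwe : String) (out : String) : Prop := out = categorize_cwe_alt cwe
instance (cwe : String) (out : String) : Decidable (Spec_categorize_cwe cwe out) := by unfold Spec_categorize_cwe; infer_instance

-- ===== CLAIM (what is proved, stated in full; the proofs are below) =====
def Claim_equal_categorize_cwe : Prop := ∀ (cwe : String), Dom_categorize_cwe cwe → Spec_categorize_cwe cwe (categorize_cwe cwe)

-- ===== LEMMAS AND PROOFS =====
set_option maxRecDepth 4096
set_option maxHeartbeats 1000000

-- char-list versions of the data and of both classification phases (proof-side only)
def pvCatsC : List (String × List (List Char)) := [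
    ("injection", [['7','8'], ['8','9'], ['9','0'], ['9','1'], ['9','3'], ['9','4'], ['9','5'], ['9','6'], ['9','7'], ['9','8'], ['9','9']]),
    ("crypto", [['3','2','7'], ['3','2','6'], ['3','1','0'], ['3','1','1'], ['3','1','2'], ['3','1','3'], ['3','1','4'], ['3','1','5'], ['3','1','6'], ['3','1','7'], ['3','1','8'], ['3','1','9'], ['3','2','0'], ['3','2','1'], ['3','2','2'], ['3','2','3'], ['3','2','4'], ['3','2','5']]),
    ("auth", [['2','8','7'], ['2','8','5'], ['2','8','6'], ['2','8','8'], ['2','8','9'], ['2','9','0'], ['2','9','1'], ['2','9','2'], ['2','9','3'], ['2','9','4'], ['2','9','5'], ['2','9','6'], ['2','9','7'], ['2','9','8'], ['2','9','9'], ['3','0','0'], ['3','0','1'], ['3','0','2'], ['3','0','3'], ['3','0','4'], ['3','0','5'], ['3','0','6'], ['3','0','7'], ['3','0','8'], ['3','0','9']]),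
    ("input_validation", [['2','0'], ['2','2'], ['2','3'], ['2','4'], ['2','5'], ['2','6'], ['2','7'], ['2','8'], ['2','9'], ['3','0'], ['3','1'], ['3','2'], ['3','3'], ['3','4'], ['3','5'], ['3','6'], ['3','7'], ['3','8'], ['3','9'], ['4','0'], ['4','1'], ['4','2'], ['4','3'], ['4','4'], ['4','5'], ['4','6'], ['4','7'], ['4','8'], ['4','9']]),
    ("info_exposure", [['2','0','0'], ['2','0','1'], ['2','0','2'], ['2','0','3'], ['2','0','4'], ['2','0','5'], ['2','0','6'], ['2','0','7'], ['2','0','8'], ['2','0','9'], ['2','1','0'], ['2','1','1'], ['2','1','2'], ['2','1','3'], ['2','1','4'], ['2','1','5'], ['2','1','6'], ['2','1','7'], ['2','1','8'], ['2','1','9'], ['2','2','0'], ['2','2','1'], ['2','2','2'], ['2','2','3'], ['2','2','4'], ['2','2','5'], ['2','2','6'], ['2','2','7'], ['2','2','8'], ['2','2','9'], ['2','3','0'], ['2','3','1'], ['2','3','2'], ['2','3','3'], ['2','3','4'], ['2','3','5'], ['2','3','6'], ['2','3','7'], ['2','3','8'], ['2','3','9'], ['2','4','0'], ['2','4','1'],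 ['2','4','2'], ['2','4','3'], ['2','4','4'], ['2','4','5'], ['2','4','6'], ['2','4','7'], ['2','4','8'], ['2','4','9'], ['2','5','0'], ['2','5','1'], ['2','5','2'], ['2','5','3'], ['2','5','4'], ['2','5','5'], ['2','5','6'], ['2','5','7'], ['2','5','8'], ['2','5','9'], ['2','6','0'], ['2','6','1'], ['2','6','2'], ['2','6','3'], ['2','6','4'], ['2','6','5'], ['2','6','6'], ['2','6','7'], ['2','6','8'], ['2','6','9'], ['2','7','0'], ['2','7','1'], ['2','7','2'], ['2','7','3'], ['2','7','4'], ['2','7','5'], ['2','7','6'], ['2','7','7'], ['2','7','8'], ['2','7','9'], ['2','8','0'], ['2','8','1'], ['2','8','2'], ['2','8','3'], ['2','8','4'], ['2','8','5'], ['2','8','6'], ['2','8','7'], ['2','8','8'], ['2','8','9'], ['2','9','0'], ['2','9','1'], ['2','9','2'], ['2','9','3'], ['2','9','4'], ['2','9','5'], ['2','9','6'], ['2','9','7'], ['2','9','8'], ['2','9','9'], ['3','0','0'], ['3','0','1'], ['3','0','2'], ['3','0','3'], ['3','0','4'], ['3','0','5'], ['3','0','6'], ['3','0','7'], ['3','0','8'],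 ['3','0','9'], ['3','1','0'], ['3','1','1'], ['3','1','2'], ['3','1','3'], ['3','1','4'], ['3','1','5'], ['3','1','6'], ['3','1','7'], ['3','1','8'], ['3','1','9'], ['3','2','0'], ['3','2','1'], ['3','2','2'], ['3','2','3'], ['3','2','4'], ['3','2','5'], ['3','2','6'], ['3','2','7'], ['3','2','8'], ['3','2','9'], ['3','3','0'], ['3','3','1'], ['3','3','2'], ['3','3','3'], ['3','3','4'], ['3','3','5'], ['3','3','6'], ['3','3','7'], ['3','3','8'], ['3','3','9'], ['3','4','0'], ['3','4','1'], ['3','4','2'], ['3','4','3'], ['3','4','4'], ['3','4','5'], ['3','4','6'], ['3','4','7'], ['3','4','8'], ['3','4','9'], ['3','5','0'], ['3','5','1'], ['3','5','2'], ['3','5','3'], ['3','5','4'], ['3','5','5'], ['3','5','6'], ['3','5','7'], ['3','5','8'], ['3','5','9'], ['3','6','0'], ['3','6','1'], ['3','6','2'], ['3','6','3'], ['3','6','4'], ['3','6','5'], ['3','6','6'], ['3','6','7'], ['3','6','8'], ['3','6','9'], ['3','7','0'], ['3','7','1'], ['3','7','2'], ['3','7','3'], ['3','7','4'], ['3','7','5'],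 ['3','7','6'], ['3','7','7'], ['3','7','8'], ['3','7','9'], ['3','8','0'], ['3','8','1'], ['3','8','2'], ['3','8','3'], ['3','8','4'], ['3','8','5'], ['3','8','6'], ['3','8','7'], ['3','8','8'], ['3','8','9'], ['3','9','0'], ['3','9','1'], ['3','9','2'], ['3','9','3'], ['3','9','4'], ['3','9','5'], ['3','9','6'], ['3','9','7'], ['3','9','8'], ['3','9','9']]),
    ("resource_management", [['4','0','0'], ['4','0','1'], ['4','0','2'], ['4','0','3'], ['4','0','4'], ['4','0','5'], ['4','0','6'], ['4','0','7'], ['4','0','8'], ['4','0','9'], ['4','1','0'], ['4','1','1'], ['4','1','2'], ['4','1','3'], ['4','1','4'], ['4','1','5'], ['4','1','6'], ['4','1','7'], ['4','1','8'], ['4','1','9'], ['4','2','0'], ['4','2','1'], ['4','2','2'], ['4','2','3'], ['4','2','4'], ['4','2','5'], ['4','2','6'], ['4','2','7'], ['4','2','8'], ['4','2','9'], ['4','3','0'], ['4','3','1'], ['4','3','2'], ['4','3','3'], ['4','3','4'], ['4','3','5'], ['4','3','6'], ['4','3','7'], ['4','3','8'], ['4','3','9'], ['4','4','0'], ['4','4','1'],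 ['4','4','2'], ['4','4','3'], ['4','4','4'], ['4','4','5'], ['4','4','6'], ['4','4','7'], ['4','4','8'], ['4','4','9'], ['4','5','0'], ['4','5','1'], ['4','5','2'], ['4','5','3'], ['4','5','4'], ['4','5','5'], ['4','5','6'], ['4','5','7'], ['4','5','8'], ['4','5','9'], ['4','6','0'], ['4','6','1'], ['4','6','2'], ['4','6','3'], ['4','6','4'], ['4','6','5'], ['4','6','6'], ['4','6','7'], ['4','6','8'], ['4','6','9'], ['4','7','0'], ['4','7','1'], ['4','7','2'], ['4','7','3'], ['4','7','4'], ['4','7','5'], ['4','7','6'], ['4','7','7'], ['4','7','8'], ['4','7','9'], ['4','8','0'], ['4','8','1'], ['4','8','2'], ['4','8','3'], ['4','8','4'], ['4','8','5'], ['4','8','6'], ['4','8','7'], ['4','8','8'], ['4','8','9'], ['4','9','0'], ['4','9','1'], ['4','9','2'], ['4','9','3'], ['4','9','4'], ['4','9','5'], ['4','9','6'], ['4','9','7'], ['4','9','8'], ['4','9','9']]),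
    ("other", [])]

def pvScanAC : List (String × List (List Char)) → List Char → String
  | [], _ => "other"
  | (category, cwe_list) :: rest, cs =>
      if cwe_list.contains cs then category else pvScanAC rest cs

def pvDigits : List Char := ['0','1','2','3','4','5','6','7','8','9']

def pvClassifyC (cs : List Char) : String :=
  if ((cs.length : Int) == 2 && PySem.Chars.strIsdigit cs) = true then
    if cs == ['7','8'] || cs == ['8','9'] || (PySem.Chars.startswith cs ['9'] && cs != ['9','2']) then "injection"
    else if (!PySem.Chars.strLt cs ['2','0'] && !PySem.Chars.strLt ['4','9'] cs) && cs != ['2','1'] then "input_validation"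
    else "other"
  else if ((cs.length : Int) == 3 && PySem.Chars.strIsdigit cs) = true then
    if !PySem.Chars.strLt cs ['3','1','0'] && !PySem.Chars.strLt ['3','2','7'] cs then "crypto"
    else if !PySem.Chars.strLt cs ['2','8','5'] && !PySem.Chars.strLt ['3','0','9'] cs then "auth"
    else if PySem.Chars.startswith cs ['2'] || PySem.Chars.startswith cs ['3'] then "info_exposure"
    else if PySem.Chars.startswith cs ['4'] then "resource_management"
    else "other"
  else "other"

theorem pv_str_beq (s t : String) : (s == t) = (s.toList == t.toList) := by
  rw [Bool.eq_iff_iff]; simp [String.toList_inj]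

theorem pv_contains_toList (l : List String) (s : String) :
    l.contains s = (l.map String.toList).contains s.toList := by
  induction l with
  | nil => rfl
  | cons x xs ih => simp only [List.map_cons, List.contains_cons, pv_str_beq, ih]

theorem pv_scan_toList (L : List (String × List String)) (num : String) :
    pvScanA L num = pvScanAC (L.map fun p => (p.1, p.2.map String.toList)) num.toList := by
  induction L with
  | nil => rfl
  | cons p rest ih => cases p; simp only [List.map_cons, pvScanA, pvScanAC, pv_contains_toList, ih]

theorem pv_catsC_eq : pvCategories.map (fun p => (p.1, p.2.map String.toList)) = pvCatsC := by decide

theorem pv_A_eq (num : String) : pvScanA pvCategories num = pvScanAC pvCatsC num.toList := by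
  rw [pv_scan_toList, pv_catsC_eq]

-- length-2-or-3 all-digit strings: every member of every category list is one
def pvGood (cs : List Char) : Bool :=
  (((cs.length : Int) == 2 || (cs.length : Int) == 3) && PySem.Chars.strIsdigit cs)

theorem pv_good_all : (pvCatsC.all fun p => p.2.all pvGood) = true := by decide

theorem pv_scanAC_other (L : List (String × List (List Char))) (cs : List Char)
    (h : ∀ p ∈ L, cs ∉ p.2) : pvScanAC L cs = "other" := by
  induction L with
  | nil => rfl
  | cons p rest ih =>
      have hp : cs ∉ p.2 := h p (List.mem_cons_self ..)
      cases p with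
      | mk cat lst =>
        have hcf : lst.contains cs = false := by
          rw [Bool.eq_false_iff]; intro hc; exact hp (List.contains_iff_mem.mp hc)
        simp only [pvScanAC, hcf, Bool.false_eq_true, if_false]
        exact ih fun q hq => h q (List.mem_cons_of_mem _ hq)

theorem pv_char_eq_of_toNat (c d : Char) (h : c.val.toNat = d.val.toNat) : c = d :=
  Char.ext (UInt32.toNat_inj.mp h)

theorem pv_digit_cases (c : Char) (h : PySem.Chars.isdigit c = true) : c ∈ pvDigits := by
  unfold PySem.Chars.isdigit at h
  simp only [Bool.and_eq_true, decide_eq_true_eq, Char.le_def, UInt32.le_iff_toNat_le] at h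
  obtain ⟨h1, h2⟩ := h
  have h1' : 48 ≤ c.val.toNat := h1
  have h2' : c.val.toNat ≤ 57 := h2
  show c ∈ ['0','1','2','3','4','5','6','7','8','9']
  simp only [List.mem_cons, List.not_mem_nil, or_false]
  interval_cases hv : c.val.toNat
  · exact Or.inl (pv_char_eq_of_toNat c '0' hv)
  · exact Or.inr <| Or.inl (pv_char_eq_of_toNat c '1' hv)
  · exact Or.inr <| Or.inr <| Or.inl (pv_char_eq_of_toNat c '2' hv)
  · exact Or.inr <| Or.inr <| Or.inr <| Or.inl (pv_char_eq_of_toNat c '3' hv)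
  · exact Or.inr <| Or.inr <| Or.inr <| Or.inr <| Or.inl (pv_char_eq_of_toNat c '4' hv)
  · exact Or.inr <| Or.inr <| Or.inr <| Or.inr <| Or.inr <| Or.inl (pv_char_eq_of_toNat c '5' hv)
  · exact Or.inr <| Or.inr <| Or.inr <| Or.inr <| Or.inr <| Or.inr <| Or.inl (pv_char_eq_of_toNat c '6' hv)
  · exact Or.inr <| Or.inr <| Or.inr <| Or.inr <| Or.inr <| Or.inr <| Or.inr <| Or.inl (pv_char_eq_of_toNat c '7' hv)
  · exact Or.inr <| Or.inr <| Or.inr <| Or.inr <| Or.inr <| Or.inr <| Or.inr <| Or.inr <| Or.inl (pv_char_eq_of_toNat c '8' hv)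
  · exact Or.inr <| Or.inr <| Or.inr <| Or.inr <| Or.inr <| Or.inr <| Or.inr <| Or.inr <| Or.inr (pv_char_eq_of_toNat c '9' hv)

theorem pv_key2 : (pvDigits.all fun a => pvDigits.all fun b =>
    pvScanAC pvCatsC [a,b] == pvClassifyC [a,b]) = true := by decide

theorem pv_key3 : (pvDigits.all fun a => pvDigits.all fun b => pvDigits.all fun c =>
    pvScanAC pvCatsC [a,b,c] == pvClassifyC [a,b,c]) = true := by decide

theorem pv_C_key (cs : List Char) : pvScanAC pvCatsC cs = pvClassifyC cs := by
  by_cases h2 : ((cs.length : Int) == 2 && PySem.Chars.strIsdigit cs) = true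
  · -- cs = [a, b], both digits
    obtain ⟨hl, hd⟩ := Bool.and_eq_true_iff.mp h2
    have hlen : cs.length = 2 := by exact_mod_cast beq_iff_eq.mp hl
    obtain ⟨a, b, rfl⟩ := List.length_eq_two.mp hlen
    have hall : PySem.Chars.isdigit a = true ∧ PySem.Chars.isdigit b = true := by
      simpa [PySem.Chars.strIsdigit] using hd
    have ha := pv_digit_cases a hall.1
    have hb := pv_digit_cases b hall.2
    have hk := pv_key2
    simp only [List.all_eq_true] at hk
    exact eq_of_beq (hk a ha b hb)
  · by_cases h3 : ((cs.length : Int) == 3 && PySem.Chars.strIsdigit cs) = true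
    · obtain ⟨hl, hd⟩ := Bool.and_eq_true_iff.mp h3
      have hlen : cs.length = 3 := by exact_mod_cast beq_iff_eq.mp hl
      obtain ⟨a, b, c, rfl⟩ := List.length_eq_three.mp hlen
      have hall : PySem.Chars.isdigit a = true ∧ PySem.Chars.isdigit b = true ∧
          PySem.Chars.isdigit c = true := by
        simpa [PySem.Chars.strIsdigit] using hd
      have ha := pv_digit_cases a hall.1
      have hb := pv_digit_cases b hall.2.1
      have hc := pv_digit_cases c hall.2.2
      have hk := pv_key3
      simp only [List.all_eq_true] at hk
      exact eq_of_beq (hk a ha b hb c hc)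
    · -- not a canonical 2- or 3-char digit string: both classify as "other"
      have hscan : pvScanAC pvCatsC cs = "other" := by
        apply pv_scanAC_other
        intro p hp hmem
        have hga := pv_good_all
        simp only [List.all_eq_true] at hga
        have hg : pvGood cs = true := hga p hp cs hmem
        obtain ⟨hor, hd⟩ := Bool.and_eq_true_iff.mp hg
        rcases Bool.or_eq_true_iff.mp hor with h | h
        · exact h2 (by rw [h, hd]; rfl)
        · exact h3 (by rw [h, hd]; rfl)
      rw [hscan]
      unfold pvClassifyC
      rw [if_neg (by simpa using h2), if_neg (by simpa using h3)]

-- B's classification phase, read through the string→char-list bridges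
theorem pv_B_eq (num : String) :
    (if PySem.Str.len num == 2 && PySem.Str.strIsdigit num then
      if num == "78" || num == "89" || (PySem.Str.startswith num "9" && num != "92") then "injection"
      else if (!PySem.Chars.strLt num.toList "20".toList && !PySem.Chars.strLt "49".toList num.toList)
              && num != "21" then "input_validation"
      else "other"
    else if PySem.Str.len num == 3 && PySem.Str.strIsdigit num then
      if !PySem.Chars.strLt num.toList "310".toList && !PySem.Chars.strLt "327".toList num.toList then "crypto"
      else if !PySem.Chars.strLt num.toList "285".toList && !PySem.Chars.strLt "309".toList num.toList then "auth"
      else if PySem.Str.startswith num "2" || PySem.Str.startswith num "3" then "info_exposure"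
      else if PySem.Str.startswith num "4" then "resource_management"
      else "other"
    else "other") = pvClassifyC num.toList := by
  have l78 : ("78" : String).toList = ['7','8'] := by decide
  have l89 : ("89" : String).toList = ['8','9'] := by decide
  have l92 : ("92" : String).toList = ['9','2'] := by decide
  have l20 : ("20" : String).toList = ['2','0'] := by decide
  have l49 : ("49" : String).toList = ['4','9'] := by decide
  have l21 : ("21" : String).toList = ['2','1'] := by decide
  have l310 : ("310" : String).toList = ['3','1','0'] := by decide
  have l327 : ("327" : String).toList = ['3','2','7'] := by decide
  have l285 : ("285" : String).toList = ['2','8','5'] := by decide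
  have l309 : ("309" : String).toList = ['3','0','9'] := by decide
  have l2 : ("2" : String).toList = ['2'] := by decide
  have l3 : ("3" : String).toList = ['3'] := by decide
  have l4 : ("4" : String).toList = ['4'] := by decide
  have l9 : ("9" : String).toList = ['9'] := by decide
  simp only [pvClassifyC, PySem.Str.len_eq, PySem.Str.strIsdigit_eq, PySem.Str.startswith_eq,
    bne, pv_str_beq, l78, l89, l92, l20, l49, l21, l310, l327, l285, l309, l2, l3, l4, l9]
  rfl

-- ===== VERDICT (by name: the statement is the Claim_ definition above) =====
theorem categorize_cwe_spec : Claim_equal_categorize_cwe := by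
  intro cwe _
  unfold Spec_categorize_cwe categorize_cwe categorize_cwe_alt
  by_cases h : (cwe == "") = true
  · simp [h]
  · simp only [h, if_false, Bool.false_eq_true]
    generalize (if PySem.Str.isIn "-" cwe then
        (PySem.List.pyGet? ((PySem.Str.split? cwe "-").getD []) (-1)).getD ""
      else cwe) = num
    rw [pv_A_eq, pv_B_eq, pv_C_key]
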